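-- pv_equiv track=rewrite | github.com/yue818/amazon_product_managemen | skuapp/modelsadminx/t_tort_aliexpress_Admin.py | getMainSKU
-- ===== SOURCE A (Python) =====
-- def getMainSKU(sku):
--     v_Tmp = ''
--     V_SZ = 0
--     v_break = 0
--     V_ZM =0
--     for v in sku:
--         if v_break < 0 :
--             break
--         if v >='0' and v <='9' :
--             v_Tmp = v_Tmp + v
--             V_SZ += 1
--         else:
--             V_ZM  +=1
--             if V_SZ > 0 :
--                 v_break = -1
--             else:
--                 v_Tmp = v_Tmp +v
--     return  v_Tmp
-- ===== SOURCE B (Python) =====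
-- def getMainSKU(sku):
--     n = len(sku)
--     i = 0
--     while i < n and not ('0' <= sku[i] <= '9'):
--         i += 1
--     j = i
--     while j < n and '0' <= sku[j] <= '9':
--         j += 1
--     return sku[:j]
-- ===== Notes on version B (the rewrite author's own statement) =====
-- stated objective: simpler
-- what changed: Replaced A's accumulator loop with break-flag and unused counters by two index scans (skip leading non-digits, then span the digit run) and a single slice sku[:j].
import Mathlib
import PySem

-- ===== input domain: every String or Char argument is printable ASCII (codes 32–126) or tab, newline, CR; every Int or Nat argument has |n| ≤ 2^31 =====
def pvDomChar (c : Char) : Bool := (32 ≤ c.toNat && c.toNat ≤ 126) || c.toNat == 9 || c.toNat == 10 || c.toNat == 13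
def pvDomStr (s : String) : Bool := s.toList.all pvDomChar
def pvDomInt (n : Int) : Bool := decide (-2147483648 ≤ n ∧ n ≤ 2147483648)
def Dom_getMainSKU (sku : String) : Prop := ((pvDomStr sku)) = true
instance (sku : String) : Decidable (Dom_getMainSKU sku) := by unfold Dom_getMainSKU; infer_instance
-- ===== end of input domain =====

-- B replaces A's accumulator loop (break flag, unused counters) by two index scans and one slice: simpler.

-- ===== PORT A =====
-- A's loop: state (v_Tmp, V_SZ, v_break, V_ZM); break modeled by the `brk < 0` check at the top.
def getMainSKU_loopA : List Char → List Char → Int → Int → Int → List Char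
  | [], tmp, _, _, _ => tmp
  | v :: rest, tmp, sz, brk, zm =>
    if brk < 0 then tmp
    else if '0' ≤ v ∧ v ≤ '9' then getMainSKU_loopA rest (tmp ++ [v]) (sz + 1) brk zm
    else if sz > 0 then getMainSKU_loopA rest tmp sz (-1) (zm + 1)
    else getMainSKU_loopA rest (tmp ++ [v]) sz brk (zm + 1)

def getMainSKU (sku : String) : String :=
  String.ofList (getMainSKU_loopA sku.toList [] 0 0 0)

-- ===== PORT B =====
-- first while: advance i while sku[i] is not an ASCII digit
def getMainSKU_skipNon : List Char → Nat → Nat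
  | [], i => i
  | c :: rest, i => if '0' ≤ c ∧ c ≤ '9' then i else getMainSKU_skipNon rest (i + 1)

-- second while: advance j while sku[j] is an ASCII digit
def getMainSKU_skipDig : List Char → Nat → Nat
  | [], j => j
  | c :: rest, j => if '0' ≤ c ∧ c ≤ '9' then getMainSKU_skipDig rest (j + 1) else j

def getMainSKU_alt (sku : String) : String :=
  let l := sku.toList
  let i := getMainSKU_skipNon l 0
  let j := getMainSKU_skipDig (l.drop i) i
  String.ofList (l.take j)   -- sku[:j] with 0 ≤ j ≤ len

-- ===== PRECONDITION & SPEC =====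
def Spec_getMainSKU (sku : String) (out : String) : Prop := out = getMainSKU_alt sku
instance (sku : String) (out : String) : Decidable (Spec_getMainSKU sku out) := by unfold Spec_getMainSKU; infer_instance

-- ===== CLAIM (what is proved, stated in full; the proofs are below) =====
def Claim_equal_getMainSKU : Prop := ∀ (sku : String), Dom_getMainSKU sku → Spec_getMainSKU sku (getMainSKU sku)

-- ===== LEMMAS AND PROOFS =====

-- spec-side description of the result: leading non-digits, then the first digit run
def pvDig : List Char → List Char
  | [] => []
  | c :: rest => if '0' ≤ c ∧ c ≤ '9' then c :: pvDig rest else []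

def pvRes : List Char → List Char
  | [] => []
  | c :: rest => if '0' ≤ c ∧ c ≤ '9' then c :: pvDig rest else c :: pvRes rest

lemma loopA_dead (l : List Char) (tmp : List Char) (sz zm : Int) :
    getMainSKU_loopA l tmp sz (-1) zm = tmp := by
  cases l <;> simp [getMainSKU_loopA]

lemma loopA_phase2 (l : List Char) (tmp : List Char) (sz zm : Int) (hsz : sz > 0) :
    getMainSKU_loopA l tmp sz 0 zm = tmp ++ pvDig l := by
  induction l generalizing tmp sz zm with
  | nil => simp [getMainSKU_loopA, pvDig]
  | cons c rest ih =>
    by_cases h : '0' ≤ c ∧ c ≤ '9'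
    · simp [getMainSKU_loopA, pvDig, h, ih (tmp ++ [c]) (sz + 1) zm (by omega)]
    · simp [getMainSKU_loopA, pvDig, h, hsz, loopA_dead]

lemma loopA_phase1 (l : List Char) (tmp : List Char) (zm : Int) :
    getMainSKU_loopA l tmp 0 0 zm = tmp ++ pvRes l := by
  induction l generalizing tmp zm with
  | nil => simp [getMainSKU_loopA, pvRes]
  | cons c rest ih =>
    by_cases h : '0' ≤ c ∧ c ≤ '9'
    · simp [getMainSKU_loopA, pvRes, h, loopA_phase2 rest (tmp ++ [c]) 1 zm (by omega)]
    · simp [getMainSKU_loopA, pvRes, h, ih (tmp ++ [c]) (zm + 1)]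

-- count of leading non-digits / digits
def pvNonLen : List Char → Nat
  | [] => 0
  | c :: rest => if '0' ≤ c ∧ c ≤ '9' then 0 else 1 + pvNonLen rest

def pvDigLen : List Char → Nat
  | [] => 0
  | c :: rest => if '0' ≤ c ∧ c ≤ '9' then 1 + pvDigLen rest else 0

lemma skipNon_eq (l : List Char) (i : Nat) :
    getMainSKU_skipNon l i = i + pvNonLen l := by
  induction l generalizing i with
  | nil => simp [getMainSKU_skipNon, pvNonLen]
  | cons c rest ih =>
    by_cases h : '0' ≤ c ∧ c ≤ '9'
    · simp [getMainSKU_skipNon, pvNonLen, h]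
    · simp [getMainSKU_skipNon, pvNonLen, h, ih]; omega

lemma skipDig_eq (l : List Char) (j : Nat) :
    getMainSKU_skipDig l j = j + pvDigLen l := by
  induction l generalizing j with
  | nil => simp [getMainSKU_skipDig, pvDigLen]
  | cons c rest ih =>
    by_cases h : '0' ≤ c ∧ c ≤ '9'
    · simp [getMainSKU_skipDig, pvDigLen, h, ih]; omega
    · simp [getMainSKU_skipDig, pvDigLen, h]

lemma take_digLen (l : List Char) : l.take (pvDigLen l) = pvDig l := by
  induction l with
  | nil => simp [pvDigLen, pvDig]
  | cons c rest ih =>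
    by_cases h : '0' ≤ c ∧ c ≤ '9'
    · simp [pvDigLen, pvDig, h, Nat.add_comm, ih]
    · simp [pvDigLen, pvDig, h]

lemma take_two_phase (l : List Char) :
    l.take (pvNonLen l + pvDigLen (l.drop (pvNonLen l))) = pvRes l := by
  induction l with
  | nil => simp [pvNonLen, pvRes]
  | cons c rest ih =>
    by_cases h : '0' ≤ c ∧ c ≤ '9'
    · simp [pvNonLen, pvRes, h, pvDigLen, Nat.add_comm, take_digLen]
    · have hd : List.drop (1 + pvNonLen rest) (c :: rest) = List.drop (pvNonLen rest) rest := by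
        rw [Nat.add_comm]; simp
      have hn : 1 + pvNonLen rest + pvDigLen (rest.drop (pvNonLen rest))
           = (pvNonLen rest + pvDigLen (rest.drop (pvNonLen rest))) + 1 := by omega
      simp only [pvNonLen, pvRes, h, if_false, hd, hn, List.take_succ_cons, ih]

-- ===== VERDICT (by name: the statement is the Claim_ definition above) =====
theorem getMainSKU_spec : Claim_equal_getMainSKU := by
  intro sku _
  unfold Spec_getMainSKU getMainSKU getMainSKU_alt
  simp only [loopA_phase1, skipNon_eq, skipDig_eq, Nat.zero_add, take_two_phase,
    List.nil_append]
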